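-- pv_equiv track=rewrite | github.com/RiccardoSpolaor/Verbal-Explanations-of-Spatio-Temporal-Graph-Neural-Networks-for-Traffic-Forecasting | src/verbal_explanations/content_extraction.py | get_repetition_of_location_information
-- ===== SOURCE A (Python) =====
-- from typing import Dict, List, Tuple
--
-- def get_repetition_of_location_information(
--     location_information: Dict[str, List[int]],
--     previous_location_information: List[Dict[str, List[int]]] = None,
--     ) -> Dict[str, int]:
--     """
--     For each street, count the times it has been involved in the previous
--     location information.
--
--     Parameters
--     ----------
--     location_information : { str: list of int }
--         The dictionary containing the location information.
--     previous_location_information : list of { str: list of int }, optional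
--         The list of the previous location information, by default None
--
--     Returns
--     -------
--     { str: int }
--         The dictionary containing the times each street has been involved in
--         the previous location information.
--     """
--     # Set the dictionary containing the times each street has been involved in
--     # the previous location information to count 0 for each street.
--     equal_times_counts = { k: 0 for k in location_information.keys() }
--
--     if previous_location_information is not None:
--         # For each street, count the times it has been involved in the previous
--         # location information.
--         for k in location_information.keys():
--             equal_times_count = 0
--             for previous_location_info in previous_location_information:
--                 if k in previous_location_info.keys():
--                     equal_times_count += 1
--             equal_times_counts[k] = equal_times_count
--
--     return equal_times_counts
-- ===== SOURCE B (Python) =====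
-- def get_repetition_of_location_information(
--     location_information,
--     previous_location_information=None,
--     ):
--     # One pass over previous_location_information: build a frequency table of
--     # all keys seen there, then read it out in location_information's key order.
--     table = {}
--     if previous_location_information is not None:
--         for previous_location_info in previous_location_information:
--             for k in previous_location_info:
--                 table[k] = table.get(k, 0) + 1
--     return {k: table.get(k, 0) for k in location_information}
-- ===== Notes on version B (the rewrite author's own statement) =====
-- stated objective: faster
-- what changed: Replaces A's key-outer nested scan (for each target key, rescan every previous dict) by a single previous-outer pass that builds a key-frequency table once, then reads the table out per target key.
import Mathlib
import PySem

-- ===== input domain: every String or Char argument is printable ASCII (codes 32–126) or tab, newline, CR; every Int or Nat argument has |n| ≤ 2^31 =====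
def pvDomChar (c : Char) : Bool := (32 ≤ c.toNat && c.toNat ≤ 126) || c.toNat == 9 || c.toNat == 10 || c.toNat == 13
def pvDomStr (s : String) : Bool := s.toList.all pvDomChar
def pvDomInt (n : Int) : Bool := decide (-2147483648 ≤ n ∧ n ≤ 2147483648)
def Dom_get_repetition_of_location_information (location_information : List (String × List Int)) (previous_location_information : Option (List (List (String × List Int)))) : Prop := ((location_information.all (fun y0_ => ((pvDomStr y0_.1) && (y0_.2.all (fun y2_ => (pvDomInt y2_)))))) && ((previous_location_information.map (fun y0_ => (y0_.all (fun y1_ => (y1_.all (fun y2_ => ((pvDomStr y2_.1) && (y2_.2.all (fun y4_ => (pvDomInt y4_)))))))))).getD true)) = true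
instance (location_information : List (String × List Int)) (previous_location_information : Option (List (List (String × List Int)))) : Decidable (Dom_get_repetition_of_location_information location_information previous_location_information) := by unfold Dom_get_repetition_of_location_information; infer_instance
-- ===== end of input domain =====

-- B replaces A's key-outer nested scan by one previous-outer pass that builds a key-frequency table, then a per-key read-out.
-- ===== PORT A =====
def get_repetition_of_location_information (location_information : List (String × List Int)) (previous_location_information : Option (List (List (String × List Int)))) : List (String × Int) :=
  let locd := PySem.Dict.ofList location_information
  -- equal_times_counts = { k: 0 for k in location_information.keys() }
  let counts0 : PySem.Dict String Int :=
    locd.keys.foldl (fun d k => d.insert k 0) PySem.Dict.empty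
  match previous_location_information with
  | none => counts0.items
  | some prevs =>
      -- for each key: count the previous dicts containing it, then equal_times_counts[k] = count
      (locd.keys.foldl (fun d k =>
          d.insert k (prevs.foldl
            (fun c p => if (PySem.Dict.ofList p).contains k then c + 1 else c) 0))
        counts0).items

-- ===== PORT B =====
def get_repetition_of_location_information_alt (location_information : List (String × List Int)) (previous_location_information : Option (List (List (String × List Int)))) : List (String × Int) :=
  -- table[k] = table.get(k, 0) + 1 over all keys of all previous dicts
  let table : PySem.Dict String Int :=
    match previous_location_information with
    | none => PySem.Dict.empty
    | some prevs =>
        prevs.foldl (fun t p =>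
            (PySem.Dict.ofList p).keys.foldl (fun t k => t.insert k (t.getD k 0 + 1)) t)
          PySem.Dict.empty
  -- { k: table.get(k, 0) for k in location_information }
  ((PySem.Dict.ofList location_information).keys.foldl
      (fun d k => d.insert k (table.getD k 0)) PySem.Dict.empty).items

-- ===== PRECONDITION & SPEC =====
def Spec_get_repetition_of_location_information (location_information : List (String × List Int)) (previous_location_information : Option (List (List (String × List Int)))) (out : List (String × Int)) : Prop := out = get_repetition_of_location_information_alt location_information previous_location_information
instance (location_information : List (String × List Int)) (previous_location_information : Option (List (List (String × List Int)))) (out : List (String × Int)) : Decidable (Spec_get_repetition_of_location_information location_information previous_location_information out) := by unfold Spec_get_repetition_of_location_information; infer_instance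

-- ===== CLAIM (what is proved, stated in full; the proofs are below) =====
def Claim_equal_get_repetition_of_location_information : Prop := ∀ (location_information : List (String × List Int)) (previous_location_information : Option (List (List (String × List Int)))), Dom_get_repetition_of_location_information location_information previous_location_information → Spec_get_repetition_of_location_information location_information previous_location_information (get_repetition_of_location_information location_information previous_location_information)

-- ===== LEMMAS AND PROOFS =====

-- Re-inserting values f k over a Nodup key list whose (k, g k) pairs already sit in the dict
-- after a disjoint prefix rewrites exactly those pairs in place.
theorem pv_overwrite_items (f g : String → Int) :
    ∀ (ks : List String) (pre : List (String × Int)) (d : PySem.Dict String Int),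
      ks.Nodup → (∀ k ∈ ks, ∀ p ∈ pre, p.1 ≠ k) →
      d.items = pre ++ ks.map (fun k => (k, g k)) →
      (ks.foldl (fun d k => d.insert k (f k)) d).items = pre ++ ks.map (fun k => (k, f k)) := by
  intro ks
  induction ks with
  | nil => intro pre d _ _ h; simpa using h
  | cons k ks ih =>
      intro pre d hnd hdisj hitems
      have hk : k ∈ d.keys := by
        simp only [PySem.Dict.keys, hitems]
        simp
      have hc : d.contains k = true := (PySem.Dict.contains_iff_mem_keys d k).mpr hk
      have hstep : (d.insert k (f k)).items = (pre ++ [(k, f k)]) ++ ks.map (fun j => (j, g j)) := by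
        rw [PySem.Dict.items_insert_of_contains d (f k) hc, hitems]
        simp only [List.map_append, List.map_cons, List.map_map]
        have hpre : pre.map (fun p => if (p.1 == k) = true then (k, f k) else p) = pre := by
          rw [List.map_congr_left (g := id) ?_, List.map_id]
          intro p hp
          simp [hdisj k (by simp) p hp]
        have hrest : ks.map ((fun p => if (p.1 == k) = true then (k, f k) else p) ∘ fun j => (j, g j))
            = ks.map (fun j => (j, g j)) := by
          apply List.map_congr_left
          intro j hj
          have hne : j ≠ k := by
            rintro rfl; exact (List.nodup_cons.mp hnd).1 hj
          simp [Function.comp, hne]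
        simp only [hpre, hrest]
        simp
      rw [List.foldl_cons]
      rw [ih (pre ++ [(k, f k)]) (d.insert k (f k)) (List.nodup_cons.mp hnd).2 ?_ hstep]
      · simp
      · intro j hj p hp
        rcases List.mem_append.mp hp with h | h
        · exact hdisj j (by simp [hj]) p h
        · simp only [List.mem_singleton] at h
          subst h
          rintro rfl
          exact (List.nodup_cons.mp hnd).1 hj

-- The frequency table's entry at k counts k across all previous dicts' key lists.
theorem pv_getD_table (k : String) :
    ∀ (prevs : List (List (String × List Int))) (t : PySem.Dict String Int),
      (prevs.foldl (fun t p =>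
          (PySem.Dict.ofList p).keys.foldl (fun t j => t.insert j (t.getD j 0 + 1)) t) t).getD k 0
        = t.getD k 0 + ((prevs.map (fun p => (((PySem.Dict.ofList p).keys.count k : Nat) : Int))).sum) := by
  intro prevs
  induction prevs with
  | nil => intro t; simp
  | cons p prevs ih =>
      intro t
      rw [List.foldl_cons, ih, PySem.Dict.getD_foldl_insert_add_one]
      simp [add_assoc]

-- Per previous dict: its (Nodup) key list counts k once iff it contains k.
theorem pv_count_keys (p : List (String × List Int)) (k : String) :
    (((PySem.Dict.ofList p).keys.count k : Nat) : Int)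
      = if (PySem.Dict.ofList p).contains k then 1 else 0 := by
  by_cases h : (PySem.Dict.ofList p).contains k = true
  · rw [if_pos h]
    have hm : k ∈ (PySem.Dict.ofList p).keys := (PySem.Dict.contains_iff_mem_keys _ k).mp h
    rw [List.count_eq_one_of_mem (PySem.Dict.nodup_keys_ofList p) hm]
    rfl
  · rw [if_neg h]
    have hm : k ∉ (PySem.Dict.ofList p).keys := fun hmm =>
      h ((PySem.Dict.contains_iff_mem_keys _ k).mpr hmm)
    rw [List.count_eq_zero_of_not_mem hm]
    rfl

-- ===== VERDICT (by name: the statement is the Claim_ definition above) =====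
theorem get_repetition_of_location_information_spec : Claim_equal_get_repetition_of_location_information := by
  intro loc prev _
  unfold Spec_get_repetition_of_location_information
  unfold get_repetition_of_location_information get_repetition_of_location_information_alt
  cases prev with
  | none => simp [PySem.Dict.getD_empty]
  | some prevs =>
      simp only
      have hnd : (PySem.Dict.ofList loc).keys.Nodup := PySem.Dict.nodup_keys_ofList loc
      have h0 : ((PySem.Dict.ofList loc).keys.foldl (fun d k => d.insert k 0)
          PySem.Dict.empty).items = (PySem.Dict.ofList loc).keys.map (fun k => (k, (0 : Int))) := by
        rw [PySem.Dict.items_foldl_insert_fresh _ _ _ _ (by simp [PySem.Dict.contains_empty]) (by simp [hnd])]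
        simp [show PySem.Dict.empty.items = ([] : List (String × Int)) from rfl]
      rw [pv_overwrite_items _ _ _ [] _ hnd (by simp) (by simpa using h0)]
      rw [PySem.Dict.items_foldl_insert_fresh _ _ _ _ (by simp [PySem.Dict.contains_empty]) (by simp [hnd])]
      simp only [show PySem.Dict.empty.items = ([] : List (String × Int)) from rfl, List.nil_append]
      apply List.map_congr_left
      intro k _
      rw [pv_getD_table, PySem.Dict.getD_empty]
      rw [PySem.List.foldl_count_if]
      rw [List.map_congr_left (fun p _ => pv_count_keys p k)]
      rw [PySem.List.sum_map_ite_one_zero]
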